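-- pv_equiv track=rewrite | github.com/CharanBS18/PlantHealthRAG | services/language_support.py | _fallback_translate
-- ===== SOURCE A (Python) =====
-- def _fallback_translate(text: str, language: str) -> str:
--     replacements = {
--         "Hindi": {
--             "Disease Name": "रोग का नाम",
--             "What You Should Do Now": "अभी क्या करना चाहिए",
--             "Precautions": "सावधानियां",
--             "Top Matches": "शीर्ष मिलान",
--             "Safety Notes": "सुरक्षा नोट",
--             "Symptom clue": "लक्षण संकेत",
--             "confidence": "विश्वास",
--         },
--         "Telugu": {
--             "Disease Name": "వ్యాధి పేరు",
--             "What You Should Do Now": "ఇప్పుడే చేయాల్సినవి",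
--             "Precautions": "జాగ్రత్తలు",
--             "Top Matches": "అత్యుత్తమ సరిపోలికలు",
--             "Safety Notes": "భద్రత సూచనలు",
--             "Symptom clue": "లక్షణ సూచన",
--             "confidence": "నమ్మకం",
--         },
--     }
--     mapping = replacements.get(language, {})
--     out = text
--     for src, dst in mapping.items():
--         out = out.replace(src, dst)
--     return out
-- ===== SOURCE B (Python) =====
-- import re
--
--
-- def _fallback_translate(text: str, language: str) -> str:
--     mapping = {
--         "Hindi": {
--             "Disease Name": "रोग का नाम",
--             "What You Should Do Now": "अभी क्या करना चाहिए",
--             "Precautions": "सावधानियां",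
--             "Top Matches": "शीर्ष मिलान",
--             "Safety Notes": "सुरक्षा नोट",
--             "Symptom clue": "लक्षण संकेत",
--             "confidence": "विश्वास",
--         },
--         "Telugu": {
--             "Disease Name": "వ్యాధి పేరు",
--             "What You Should Do Now": "ఇప్పుడే చేయాల్సినవి",
--             "Precautions": "జాగ్రత్తలు",
--             "Top Matches": "అత్యుత్తమ సరిపోలికలు",
--             "Safety Notes": "భద్రత సూచనలు",
--             "Symptom clue": "లక్షణ సూచన",
--             "confidence": "నమ్మకం",
--         },
--     }.get(language)
--     if not mapping:
--         return text
--     pattern = re.compile("|".join(map(re.escape, mapping)))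
--     return pattern.sub(lambda m: mapping[m.group(0)], text)
-- ===== Notes on version B (the rewrite author's own statement) =====
-- stated objective: idiomatic
-- what changed: A cascades 7 sequential full-text str.replace passes; B selects the mapping, and if non-empty compiles one regex alternation of the escaped source phrases and rewrites the text in a single re.sub pass that dispatches each match through the dict.
import Mathlib
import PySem

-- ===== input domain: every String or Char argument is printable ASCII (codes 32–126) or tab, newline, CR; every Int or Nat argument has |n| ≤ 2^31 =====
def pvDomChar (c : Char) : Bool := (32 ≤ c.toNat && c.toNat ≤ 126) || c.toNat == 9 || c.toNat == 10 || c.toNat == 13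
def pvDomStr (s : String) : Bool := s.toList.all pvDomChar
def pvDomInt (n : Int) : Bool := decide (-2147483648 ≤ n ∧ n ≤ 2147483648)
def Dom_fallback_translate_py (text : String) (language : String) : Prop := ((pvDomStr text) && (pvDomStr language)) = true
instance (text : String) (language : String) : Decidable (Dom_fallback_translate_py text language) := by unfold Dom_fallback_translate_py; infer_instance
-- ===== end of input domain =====

-- B replaces A's 7 sequential full-text replace passes by one single left-to-right scan that
-- dispatches each matched source phrase through the mapping (the Lean port of Source B's single re.sub pass).

-- ===== PORT A =====
def fallback_translate_py (text : String) (language : String) : String :=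
  let replacements : PySem.Dict String (PySem.Dict String String) :=
    PySem.Dict.ofList [
      ("Hindi", PySem.Dict.ofList [
        ("Disease Name", "रोग का नाम"),
        ("What You Should Do Now", "अभी क्या करना चाहिए"),
        ("Precautions", "सावधानियां"),
        ("Top Matches", "शीर्ष मिलान"),
        ("Safety Notes", "सुरक्षा नोट"),
        ("Symptom clue", "लक्षण संकेत"),
        ("confidence", "विश्वास")]),
      ("Telugu", PySem.Dict.ofList [
        ("Disease Name", "వ్యాధి పేరు"),
        ("What You Should Do Now", "ఇప్పుడే చేయాల్సినవి"),
        ("Precautions", "జాగ్రత్తలు"),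
        ("Top Matches", "అత్యుత్తమ సరిపోలికలు"),
        ("Safety Notes", "భద్రత సూచనలు"),
        ("Symptom clue", "లక్షణ సూచన"),
        ("confidence", "నమ్మకం")])]
  let mapping := replacements.getD language PySem.Dict.empty
  mapping.items.foldl (fun out p => PySem.Str.replace out p.1 p.2) text

-- ===== PORT B =====
-- Source B's per-language (source phrase, translation) pairs, in dict order
def pvHindiPairs : List (List Char × List Char) :=
  [("Disease Name".toList, "रोग का नाम".toList),
   ("What You Should Do Now".toList, "अभी क्या करना चाहिए".toList),
   ("Precautions".toList, "सावधानियां".toList),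
   ("Top Matches".toList, "शीर्ष मिलान".toList),
   ("Safety Notes".toList, "सुरक्षा नोट".toList),
   ("Symptom clue".toList, "लक्षण संकेत".toList),
   ("confidence".toList, "विश्वास".toList)]

def pvTeluguPairs : List (List Char × List Char) :=
  [("Disease Name".toList, "వ్యాధి పేరు".toList),
   ("What You Should Do Now".toList, "ఇప్పుడే చేయాల్సినవి".toList),
   ("Precautions".toList, "జాగ్రత్తలు".toList),
   ("Top Matches".toList, "అత్యుత్తమ సరిపోలికలు".toList),
   ("Safety Notes".toList, "భద్రత సూచనలు".toList),
   ("Symptom clue".toList, "లక్షణ సూచన".toList),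
   ("confidence".toList, "నమ్మకం".toList)]

-- single left-to-right pass: at each position try the alternatives in order (= re.sub with the
-- alternation pattern); on a match emit the translation and skip the phrase, else copy one char
def pvMultiSub (prs : List (List Char × List Char)) (hne : ∀ p ∈ prs, p.1 ≠ []) : List Char → List Char
  | [] => []
  | c :: t =>
    match hf : prs.find? (fun p => p.1.isPrefixOf (c :: t)) with
    | some kd => kd.2 ++ pvMultiSub prs hne ((c :: t).drop kd.1.length)
    | none => c :: pvMultiSub prs hne t
  termination_by l => l.length
  decreasing_by
    · have hmem := List.mem_of_find?_eq_some hf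
      have hk := hne _ hmem
      have hpos : 0 < kd.1.length := List.length_pos_iff.mpr hk
      simp only [List.length_drop, List.length_cons]
      omega
    · simp

def fallback_translate_py_alt (text : String) (language : String) : String :=
  if language == "Hindi" then String.ofList (pvMultiSub pvHindiPairs (by decide) text.toList)
  else if language == "Telugu" then String.ofList (pvMultiSub pvTeluguPairs (by decide) text.toList)
  else text

-- ===== PRECONDITION & SPEC =====
def Spec_fallback_translate_py (text : String) (language : String) (out : String) : Prop := out = fallback_translate_py_alt text language
instance (text : String) (language : String) (out : String) : Decidable (Spec_fallback_translate_py text language out) := by unfold Spec_fallback_translate_py; infer_instance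

-- ===== CLAIM (what is proved, stated in full; the proofs are below) =====
def Claim_equal_fallback_translate_py : Prop := ∀ (text : String) (language : String), Dom_fallback_translate_py text language → Spec_fallback_translate_py text language (fallback_translate_py text language)

-- ===== LEMMAS AND PROOFS =====

-- proof-side characterisation of PySem.Chars.replace for a nonempty needle
def pvRep (old new : List Char) (h : old ≠ []) : List Char → List Char
  | [] => []
  | c :: t =>
    if old.isPrefixOf (c :: t) then new ++ pvRep old new h ((c :: t).drop old.length)
    else c :: pvRep old new h t
  termination_by l => l.length
  decreasing_by
    · have hpos : 0 < old.length := List.length_pos_iff.mpr h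
      simp only [List.length_drop, List.length_cons]
      omega
    · simp

-- the char-level cascade A performs
def pvFold (prs : List (List Char × List Char)) (l : List Char) : List Char :=
  List.foldl (fun out p => PySem.Chars.replace out p.1 p.2) l prs

theorem pvMultiSub_nil (prs : List (List Char × List Char)) (hne : ∀ p ∈ prs, p.1 ≠ []) :
    pvMultiSub prs hne [] = [] := by
  rw [pvMultiSub]

theorem pvMultiSub_none (prs : List (List Char × List Char)) (hne : ∀ p ∈ prs, p.1 ≠ [])
    (c : Char) (t : List Char)
    (hf : prs.find? (fun p => p.1.isPrefixOf (c :: t)) = none) :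
    pvMultiSub prs hne (c :: t) = c :: pvMultiSub prs hne t := by
  rw [pvMultiSub, hf]

theorem pvRep_nil (old new : List Char) (h : old ≠ []) : pvRep old new h [] = [] := by
  simp [pvRep]

theorem pvRep_pos (old new : List Char) (h : old ≠ []) (l : List Char) (hp : old <+: l) :
    pvRep old new h l = new ++ pvRep old new h (l.drop old.length) := by
  cases l with
  | nil => exact absurd (List.prefix_nil.mp hp) h
  | cons c t =>
    rw [pvRep]
    rw [if_pos (List.isPrefixOf_iff_prefix.mpr hp)]

theorem pvRep_neg (old new : List Char) (h : old ≠ []) (c : Char) (t : List Char)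
    (hp : ¬ old <+: (c :: t)) :
    pvRep old new h (c :: t) = c :: pvRep old new h t := by
  rw [pvRep]
  rw [if_neg (by simpa [List.isPrefixOf_iff_prefix] using hp)]

theorem pvGo_eq (old new : List Char) (h : old ≠ []) :
    ∀ (fuel : Nat) (l acc : List Char), l.length ≤ fuel →
      PySem.Chars.replace.go old new fuel l acc = acc.reverse ++ pvRep old new h l := by
  intro fuel
  induction fuel with
  | zero =>
    intro l acc hl
    have : l = [] := List.eq_nil_of_length_eq_zero (Nat.le_zero.mp hl)
    subst this
    simp [PySem.Chars.replace.go, pvRep_nil]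
  | succ n ih =>
    intro l acc hl
    cases l with
    | nil => simp [PySem.Chars.replace.go, pvRep_nil]
    | cons c t =>
      rw [PySem.Chars.replace.go]
      by_cases hp : old <+: (c :: t)
      · rw [if_pos (List.isPrefixOf_iff_prefix.mpr hp)]
        have hpos : 0 < old.length := List.length_pos_iff.mpr h
        have hlen : ((c :: t).drop old.length).length ≤ n := by
          simp only [List.length_drop, List.length_cons]
          simp only [List.length_cons] at hl
          omega
        rw [ih _ _ hlen, pvRep_pos old new h _ hp]
        simp
      · rw [if_neg (by simpa [List.isPrefixOf_iff_prefix] using hp)]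
        have hlen : t.length ≤ n := by
          simp only [List.length_cons] at hl
          omega
        rw [ih _ _ hlen, pvRep_neg old new h c t hp]
        simp

theorem pvReplace_eq_rep (old new : List Char) (h : old ≠ []) (l : List Char) :
    PySem.Chars.replace l old new = pvRep old new h l := by
  have hne : old.isEmpty = false := by simp [h]
  rw [PySem.Chars.replace, hne]
  simpa using pvGo_eq old new h l.length l [] (le_refl _)

-- no b-prefix of a++v when neither of a, b is a prefix of the other
theorem pvNotPrefixAppend (a b v : List Char) (h1 : ¬ a <+: b) (h2 : ¬ b <+: a) :
    ¬ b <+: a ++ v := by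
  intro hb
  rcases List.prefix_or_prefix_of_prefix (List.prefix_append a v) hb with hc | hc
  · exact h1 hc
  · exact h2 hc

-- replacing with a translation whose first char is non-ASCII never creates a new
-- ASCII-phrase match at the front
theorem pvNoNewPrefix (old new : List Char) (h : old ≠ []) (hn : new ≠ [])
    (hna : 128 ≤ new.headI.toNat) :
    ∀ (s l : List Char), s ≠ [] → (∀ c ∈ s, c.toNat < 128) → ¬ s <+: l →
      ¬ s <+: pvRep old new h l := by
  intro s
  induction s with
  | nil => intro l hs; exact absurd rfl hs
  | cons s0 s' ih =>
    intro l _ hsa hsl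
    cases l with
    | nil =>
      rw [pvRep_nil]
      simp
    | cons c t =>
      by_cases hp : old <+: (c :: t)
      · rw [pvRep_pos old new h _ hp]
        cases new with
        | nil => exact absurd rfl hn
        | cons n0 n' =>
          intro hpre
          have h0 : s0 = n0 := (List.cons_prefix_cons.mp (by simpa using hpre)).1
          have ha : s0.toNat < 128 := hsa s0 (by simp)
          rw [h0] at ha
          simp [List.headI] at hna
          omega
      · rw [pvRep_neg old new h c t hp]
        intro hpre
        rcases List.cons_prefix_cons.mp hpre with ⟨he, htail⟩
        subst he
        by_cases hs' : s' = []
        · subst hs'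
          exact hsl (by simp)
        · have hsl' : ¬ s' <+: t := fun hc => hsl (List.cons_prefix_cons.mpr ⟨rfl, hc⟩)
          exact ih t hs' (fun c hc => hsa c (List.mem_cons_of_mem _ hc)) hsl' htail


-- a block whose chars never equal old's first char is copied verbatim
theorem pvRepSkip (old new : List Char) (h : old ≠ []) (d : List Char)
    (hsep : ∀ c ∈ d, c ≠ old.headI) :
    ∀ x, pvRep old new h (d ++ x) = d ++ pvRep old new h x := by
  induction d with
  | nil => intro x; simp
  | cons a d' ih =>
    intro x
    have hp : ¬ old <+: (a :: (d' ++ x)) := by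
      cases old with
      | nil => exact absurd rfl h
      | cons o0 o' =>
        intro hc
        have := (List.cons_prefix_cons.mp hc).1
        exact hsep a (by simp) (by simpa [List.headI] using this.symm)
    rw [List.cons_append, pvRep_neg old new h _ _ hp, ih (fun c hc => hsep c (by simp [hc]))]
    simp

-- if old matches nowhere inside (or overlapping out of) the block a, the block is copied
theorem pvRepCopy (old new : List Char) (h : old ≠ []) :
    ∀ (a v : List Char), (∀ q < a.length, ∀ w : List Char, ¬ old <+: (a.drop q ++ w)) →
      pvRep old new h (a ++ v) = a ++ pvRep old new h v := by
  intro a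
  induction a with
  | nil => intro v _; simp
  | cons c a' ih =>
    intro v hq
    have hp : ¬ old <+: (c :: (a' ++ v)) := by
      have := hq 0 (by simp) v
      simpa using this
    rw [List.cons_append, pvRep_neg old new h _ _ hp]
    rw [ih v (fun q hqlt w => by
      have := hq (q + 1) (by simpa using Nat.succ_lt_succ hqlt) w
      simpa using this)]
    simp

-- phrases are nonempty, ASCII; translations nonempty with non-ASCII first char
@[reducible] def pvGood (prs : List (List Char × List Char)) : Prop :=
  ∀ p ∈ prs, p.1 ≠ [] ∧ (∀ c ∈ p.1, c.toNat < 128) ∧ p.2 ≠ [] ∧ 128 ≤ p.2.headI.toNat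

-- no phrase occurrence can start strictly inside another phrase occurrence
@[reducible] def pvIndep (prs : List (List Char × List Char)) : Prop :=
  ∀ p ∈ prs, ∀ q ∈ prs, ∀ i < p.1.length, 0 < i →
    ¬ (p.1.drop i <+: q.1) ∧ ¬ (q.1 <+: p.1.drop i)

-- distinct pairs have prefix-incomparable phrases
@[reducible] def pvDk (prs : List (List Char × List Char)) : Prop :=
  ∀ p ∈ prs, ∀ q ∈ prs, p ≠ q → ¬ p.1 <+: q.1

-- no translation char equals the first char of any phrase
@[reducible] def pvSep (prs : List (List Char × List Char)) : Prop :=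
  ∀ p ∈ prs, ∀ q ∈ prs, ∀ c ∈ p.2, c ≠ q.1.headI

theorem pvFold_nil (prs : List (List Char × List Char)) (hne : ∀ p ∈ prs, p.1 ≠ []) :
    pvFold prs [] = [] := by
  induction prs with
  | nil => rfl
  | cons p rest ih =>
    have h1 := hne p (by simp)
    show pvFold rest (PySem.Chars.replace [] p.1 p.2) = []
    rw [pvReplace_eq_rep p.1 p.2 h1, pvRep_nil]
    exact ih (fun q hq => hne q (by simp [hq]))

theorem pvFold_cons (prs : List (List Char × List Char)) (hG : pvGood prs) (c : Char) :
    ∀ t, (∀ p ∈ prs, ¬ p.1 <+: (c :: t)) → pvFold prs (c :: t) = c :: pvFold prs t := by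
  induction prs with
  | nil => intro t _; rfl
  | cons p rest ih =>
    intro t hnp
    obtain ⟨hk, hka, hd, hdh⟩ := hG p (by simp)
    have hGr : pvGood rest := fun q hq => hG q (by simp [hq])
    have hstep : PySem.Chars.replace (c :: t) p.1 p.2 = c :: PySem.Chars.replace t p.1 p.2 := by
      rw [pvReplace_eq_rep p.1 p.2 hk, pvReplace_eq_rep p.1 p.2 hk,
        pvRep_neg p.1 p.2 hk c t (hnp p (by simp))]
    show pvFold rest (PySem.Chars.replace (c :: t) p.1 p.2) = c :: pvFold rest (PySem.Chars.replace t p.1 p.2)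
    rw [hstep]
    refine ih hGr (PySem.Chars.replace t p.1 p.2) ?_
    intro q hq
    obtain ⟨hqk, hqa, _, _⟩ := hGr q hq
    cases hq1 : q.1 with
    | nil => exact absurd hq1 hqk
    | cons q0 q' =>
      intro hpre
      rcases List.cons_prefix_cons.mp hpre with ⟨he, htail⟩
      subst he
      by_cases hq' : q' = []
      · subst hq'
        exact hnp q (by simp [hq]) (by rw [hq1]; simp)
      · have hnq : ¬ q' <+: t := by
          intro hc
          exact hnp q (by simp [hq]) (by rw [hq1]; exact List.cons_prefix_cons.mpr ⟨rfl, hc⟩)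
        rw [pvReplace_eq_rep p.1 p.2 hk] at htail
        exact pvNoNewPrefix p.1 p.2 hk hd hdh q' t hq' (fun ch hch => hqa ch (by simp [hq1, hch])) hnq htail

theorem pvFold_block (prs : List (List Char × List Char)) (hne : ∀ p ∈ prs, p.1 ≠ []) (a : List Char)
    (hq : ∀ p ∈ prs, ∀ q < a.length, ∀ w : List Char, ¬ p.1 <+: (a.drop q ++ w)) :
    ∀ v, pvFold prs (a ++ v) = a ++ pvFold prs v := by
  induction prs with
  | nil => intro v; rfl
  | cons p rest ih =>
    intro v
    have hk := hne p (by simp)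
    show pvFold rest (PySem.Chars.replace (a ++ v) p.1 p.2) = a ++ pvFold rest (PySem.Chars.replace v p.1 p.2)
    rw [pvReplace_eq_rep p.1 p.2 hk, pvReplace_eq_rep p.1 p.2 hk,
      pvRepCopy p.1 p.2 hk a v (fun q hqlt w => hq p (by simp) q hqlt w)]
    exact ih (fun q hq2 => hne q (by simp [hq2])) (fun q hq2 i hi w => hq q (by simp [hq2]) i hi w) _

theorem pvFold_post (prs : List (List Char × List Char)) (hne : ∀ p ∈ prs, p.1 ≠ []) (d : List Char)
    (hsep : ∀ p ∈ prs, ∀ c ∈ d, c ≠ p.1.headI) :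
    ∀ x, pvFold prs (d ++ x) = d ++ pvFold prs x := by
  induction prs with
  | nil => intro x; rfl
  | cons p rest ih =>
    intro x
    have hk := hne p (by simp)
    show pvFold rest (PySem.Chars.replace (d ++ x) p.1 p.2) = d ++ pvFold rest (PySem.Chars.replace x p.1 p.2)
    rw [pvReplace_eq_rep p.1 p.2 hk, pvReplace_eq_rep p.1 p.2 hk,
      pvRepSkip p.1 p.2 hk d (fun c hc => hsep p (by simp) c hc) x]
    exact ih (fun q hq2 => hne q (by simp [hq2])) (fun q hq2 c hc => hsep q (by simp [hq2]) c hc) _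

-- the heart of the equivalence: A's cascade of replaces equals B's single pass
theorem pvCascade_eq (prs : List (List Char × List Char)) (hG : pvGood prs) (hI : pvIndep prs)
    (hD : pvDk prs) (hS : pvSep prs) (hne : ∀ p ∈ prs, p.1 ≠ []) :
    ∀ l, pvFold prs l = pvMultiSub prs hne l := by
  intro l
  induction l using pvMultiSub.induct prs hne with
  | case1 => rw [pvMultiSub_nil]; exact pvFold_nil prs hne
  | case2 c t kd hf ih =>
    rw [pvMultiSub, hf]
    have hfs := List.find?_eq_some_iff_append.mp hf
    obtain ⟨hpred, pre, post, hsplit, hpre⟩ := hfs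
    have hkd : kd ∈ prs := List.mem_of_find?_eq_some hf
    have hkpre : kd.1 <+: (c :: t) := List.isPrefixOf_iff_prefix.mp hpred
    obtain ⟨hk1, _, hd1, hdh1⟩ := hG kd hkd
    obtain ⟨v, hv⟩ := hkpre
    have hvd : (c :: t).drop kd.1.length = v := by rw [← hv, List.drop_left]
    have hmem_pre : ∀ p ∈ pre, p ∈ prs := fun p hp => by rw [hsplit]; simp [hp]
    have hmem_post : ∀ p ∈ post, p ∈ prs := fun p hp => by rw [hsplit]; simp [hp]
    -- the pre-pairs cannot match at any position < kd.1.length of kd.1 ++ w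
    have hblock : ∀ p ∈ pre, ∀ q < kd.1.length, ∀ w : List Char, ¬ p.1 <+: (kd.1.drop q ++ w) := by
      intro p hp q hqlt w
      have hpm : p ∈ prs := hmem_pre p hp
      by_cases hq0 : q = 0
      · subst hq0
        have hpne : p ≠ kd := by
          intro he
          have := hpre p hp
          rw [he] at this
          simp [hpred] at this
        simp only [List.drop_zero]
        exact pvNotPrefixAppend kd.1 p.1 w (hD kd hkd p hpm (Ne.symm hpne)) (hD p hpm kd hkd hpne)
      · obtain ⟨hi1, hi2⟩ := hI kd hkd p hpm q hqlt (Nat.pos_of_ne_zero hq0)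
        exact pvNotPrefixAppend (kd.1.drop q) p.1 w hi1 hi2
    have hLHS : pvFold prs (c :: t) = kd.2 ++ pvFold prs v := by
      conv_lhs => rw [hsplit, show (c :: t) = kd.1 ++ v from hv.symm]
      rw [pvFold, List.foldl_append]
      show pvFold (kd :: post) (pvFold pre (kd.1 ++ v)) = _
      rw [pvFold_block pre (fun p hp => (hG p (hmem_pre p hp)).1) kd.1 hblock v]
      show pvFold post (PySem.Chars.replace (kd.1 ++ pvFold pre v) kd.1 kd.2) = _
      rw [pvReplace_eq_rep kd.1 kd.2 hk1,
        pvRep_pos kd.1 kd.2 hk1 _ (List.prefix_append kd.1 (pvFold pre v)), List.drop_left]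
      rw [pvFold_post post (fun p hp => (hG p (hmem_post p hp)).1) kd.2
        (fun p hp c hc => hS kd hkd p (hmem_post p hp) c hc)]
      rw [← pvReplace_eq_rep kd.1 kd.2 hk1]
      congr 1
      conv_rhs => rw [hsplit, pvFold, List.foldl_append]
      rfl
    show pvFold prs (c :: t) = kd.2 ++ pvMultiSub prs hne (List.drop kd.1.length (c :: t))
    rw [hLHS, ← ih, hvd]
  | case3 c t hf ih =>
    have hnone := List.find?_eq_none.mp hf
    have hnp : ∀ p ∈ prs, ¬ p.1 <+: (c :: t) := by
      intro p hp hc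
      have h2 := hnone p hp
      simp [List.isPrefixOf_iff_prefix.mpr hc] at h2
    rw [pvFold_cons prs hG c t hnp, ih, pvMultiSub_none prs hne c t hf]

-- lifting A's String-level fold to the char level
theorem pvStrFold (sp : List (String × String)) :
    ∀ s : String, sp ≠ [] →
      List.foldl (fun out p => PySem.Str.replace out p.1 p.2) s sp =
        String.ofList (pvFold (sp.map (fun p => (p.1.toList, p.2.toList))) s.toList) := by
  induction sp with
  | nil => intro s hs; exact absurd rfl hs
  | cons p rest ih =>
    intro s _
    cases hrest : rest with
    | nil =>
      show PySem.Str.replace s p.1 p.2 = _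
      rw [PySem.Str.replace]
      rfl
    | cons r rest' =>
      rw [← hrest]
      show List.foldl _ (PySem.Str.replace s p.1 p.2) rest = _
      rw [ih (PySem.Str.replace s p.1 p.2) (by simp [hrest])]
      show _ = String.ofList (pvFold (rest.map _) (PySem.Chars.replace s.toList p.1.toList p.2.toList))
      rw [PySem.Str.toList_replace]

-- Bool forms of the side conditions, for kernel evaluation on the concrete pair lists
def pvGoodB (prs : List (List Char × List Char)) : Bool :=
  prs.all (fun p => !p.1.isEmpty && p.1.all (fun c => decide (c.toNat < 128)) &&
    !p.2.isEmpty && decide (128 ≤ p.2.headI.toNat))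

def pvIndepB (prs : List (List Char × List Char)) : Bool :=
  prs.all (fun p => prs.all (fun q => (List.range p.1.length).all (fun i =>
    !(decide (0 < i)) || (!(p.1.drop i).isPrefixOf q.1 && !q.1.isPrefixOf (p.1.drop i)))))

def pvDkB (prs : List (List Char × List Char)) : Bool :=
  prs.all (fun p => prs.all (fun q => decide (p = q) || !p.1.isPrefixOf q.1))

def pvSepB (prs : List (List Char × List Char)) : Bool :=
  prs.all (fun p => prs.all (fun q => p.2.all (fun c => !(decide (c = q.1.headI)))))

theorem pvGood_of_B (prs : List (List Char × List Char)) (h : pvGoodB prs = true) : pvGood prs := by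
  intro p hp
  simp only [pvGoodB, List.all_eq_true, Bool.and_eq_true, Bool.not_eq_eq_eq_not, Bool.not_true,
    List.isEmpty_eq_false_iff, decide_eq_true_eq] at h
  obtain ⟨⟨⟨h1, h2⟩, h3⟩, h4⟩ := h p hp
  exact ⟨h1, h2, h3, h4⟩

theorem pvHne_of_B (prs : List (List Char × List Char)) (h : pvGoodB prs = true) :
    ∀ p ∈ prs, p.1 ≠ [] := fun p hp => (pvGood_of_B prs h p hp).1

theorem pvIndep_of_B (prs : List (List Char × List Char)) (h : pvIndepB prs = true) : pvIndep prs := by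
  intro p hp q hq i hi hi0
  simp only [pvIndepB, List.all_eq_true] at h
  have h2 := h p hp q hq i (List.mem_range.mpr hi)
  simp only [Bool.or_eq_true, Bool.not_eq_eq_eq_not, Bool.not_true, decide_eq_false_iff_not,
    Bool.and_eq_true] at h2
  rcases h2 with h2 | ⟨h2, h3⟩
  · omega
  · exact ⟨fun hc => by simp [List.isPrefixOf_iff_prefix.mpr hc] at h2,
      fun hc => by simp [List.isPrefixOf_iff_prefix.mpr hc] at h3⟩

theorem pvDk_of_B (prs : List (List Char × List Char)) (h : pvDkB prs = true) : pvDk prs := by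
  intro p hp q hq hne
  simp only [pvDkB, List.all_eq_true] at h
  have h2 := h p hp q hq
  simp only [Bool.or_eq_true, decide_eq_true_eq] at h2
  rcases h2 with h2 | h2
  · exact absurd h2 hne
  · exact fun hc => by simp [List.isPrefixOf_iff_prefix.mpr hc] at h2

theorem pvSep_of_B (prs : List (List Char × List Char)) (h : pvSepB prs = true) : pvSep prs := by
  intro p hp q hq c hc
  simp only [pvSepB, List.all_eq_true] at h
  have h2 := h p hp q hq c hc
  simpa using h2


-- concrete pair lists of port A, named for the proofs
def pvHindiStr : List (String × String) :=
  [("Disease Name", "रोग का नाम"),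
   ("What You Should Do Now", "अभी क्या करना चाहिए"),
   ("Precautions", "सावधानियां"),
   ("Top Matches", "शीर्ष मिलान"),
   ("Safety Notes", "सुरक्षा नोट"),
   ("Symptom clue", "लक्षण संकेत"),
   ("confidence", "विश्वास")]

def pvTeluguStr : List (String × String) :=
  [("Disease Name", "వ్యాధి పేరు"),
   ("What You Should Do Now", "ఇప్పుడే చేయాల్సినవి"),
   ("Precautions", "జాగ్రత్తలు"),
   ("Top Matches", "అత్యుత్తమ సరిపోలికలు"),
   ("Safety Notes", "భద్రత సూచనలు"),
   ("Symptom clue", "లక్షణ సూచన"),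
   ("confidence", "నమ్మకం")]

def pvReplDict : PySem.Dict String (PySem.Dict String String) :=
  PySem.Dict.ofList [("Hindi", PySem.Dict.ofList pvHindiStr), ("Telugu", PySem.Dict.ofList pvTeluguStr)]

theorem pvA_eq (text language : String) :
    fallback_translate_py text language =
      (pvReplDict.getD language PySem.Dict.empty).items.foldl
        (fun out p => PySem.Str.replace out p.1 p.2) text := rfl

theorem pvGet_other (language : String) (hH : language ≠ "Hindi") (hT : language ≠ "Telugu") :
    pvReplDict.get? language = none := by
  have h1 : ("Hindi" == language) = false := beq_eq_false_iff_ne.mpr (fun h => hH h.symm)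
  have h2 : ("Telugu" == language) = false := beq_eq_false_iff_ne.mpr (fun h => hT h.symm)
  rw [show pvReplDict = PySem.Dict.mk
      [("Hindi", PySem.Dict.ofList pvHindiStr), ("Telugu", PySem.Dict.ofList pvTeluguStr)] from rfl,
    PySem.Dict.get?_mk_cons, PySem.Dict.get?_mk_cons]
  simp [h1, h2, PySem.Dict.get?]


-- ===== VERDICT (by name: the statement is the Claim_ definition above) =====
set_option maxRecDepth 100000 in
theorem fallback_translate_py_spec : Claim_equal_fallback_translate_py := by
  intro text language _
  unfold Spec_fallback_translate_py
  by_cases hH : language = "Hindi"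
  · subst hH
    have hA : fallback_translate_py text "Hindi" =
        List.foldl (fun out p => PySem.Str.replace out p.1 p.2) text pvHindiStr := rfl
    have hB : fallback_translate_py_alt text "Hindi" =
        String.ofList (pvMultiSub pvHindiPairs (by decide) text.toList) := rfl
    rw [hA, hB, pvStrFold pvHindiStr text (by simp [pvHindiStr])]
    rw [show pvHindiStr.map (fun p => (p.1.toList, p.2.toList)) = pvHindiPairs from rfl]
    rw [pvCascade_eq pvHindiPairs (pvGood_of_B _ (by decide)) (pvIndep_of_B _ (by decide)) (pvDk_of_B _ (by decide)) (pvSep_of_B _ (by decide)) (pvHne_of_B _ (by decide)) text.toList]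
  · by_cases hT : language = "Telugu"
    · subst hT
      have hA : fallback_translate_py text "Telugu" =
          List.foldl (fun out p => PySem.Str.replace out p.1 p.2) text pvTeluguStr := rfl
      have hB : fallback_translate_py_alt text "Telugu" =
          String.ofList (pvMultiSub pvTeluguPairs (by decide) text.toList) := rfl
      rw [hA, hB, pvStrFold pvTeluguStr text (by simp [pvTeluguStr])]
      rw [show pvTeluguStr.map (fun p => (p.1.toList, p.2.toList)) = pvTeluguPairs from rfl]
      rw [pvCascade_eq pvTeluguPairs (pvGood_of_B _ (by decide)) (pvIndep_of_B _ (by decide)) (pvDk_of_B _ (by decide)) (pvSep_of_B _ (by decide)) (pvHne_of_B _ (by decide)) text.toList]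
    · have hA : fallback_translate_py text language = text := by
        rw [pvA_eq, PySem.Dict.getD, pvGet_other language hH hT]
        rfl
      have hB : fallback_translate_py_alt text language = text := by
        unfold fallback_translate_py_alt
        rw [if_neg (by simp [beq_eq_false_iff_ne.mpr hH]), if_neg (by simp [beq_eq_false_iff_ne.mpr hT])]
      rw [hA, hB]
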